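-- pv_equiv track=rewrite | github.com/marazzaf/VariaDEM | facets.py | dic_position_facets_bord
-- ===== SOURCE A (Python) =====
-- def dic_position_facets_bord(mesh_, facet_n_num,nb_cellules, d_):
--     resultat = dict([])
--     compteur = nb_cellules-1
--     for num_face,voisins in facet_n_num.items():
--         if len(voisins) == 1: #Face sur le bord car n'a qu'un voisin
--             if d_ == 2:
--                 resultat[num_face] = [compteur+1, compteur+2]
--                 compteur += 2
--             elif d_ == 3:
--                 resultat[num_face] = [compteur+1, compteur+2, compteur+3]
--                 compteur += 3
--             elif d_ == 1:
--                 resultat[num_face] = [compteur+1]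
--                 compteur += 1
--     return resultat
-- ===== SOURCE B (Python) =====
-- def dic_position_facets_bord(mesh_, facet_n_num, nb_cellules, d_):
--     if d_ not in (1, 2, 3):
--         return {}
--     boundary = [f for f, v in facet_n_num.items() if len(v) == 1]
--     dofs = list(range(nb_cellules, nb_cellules + len(boundary) * d_))
--     blocks = [dofs[k:k + d_] for k in range(0, len(dofs), d_)]
--     return dict(zip(boundary, blocks))
-- ===== Notes on version B (the rewrite author's own statement) =====
-- stated objective: alternative
-- what changed: A threads a running counter through one loop with per-d_ branches; B instead works in stages: it collects the ordered boundary-face list, materialises the entire DOF index range in one call, chunks it into d_-sized slices, and builds the dict as dict(zip(boundary, blocks)), with a single up-front guard for d_ outside {1,2,3}.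
import Mathlib
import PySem

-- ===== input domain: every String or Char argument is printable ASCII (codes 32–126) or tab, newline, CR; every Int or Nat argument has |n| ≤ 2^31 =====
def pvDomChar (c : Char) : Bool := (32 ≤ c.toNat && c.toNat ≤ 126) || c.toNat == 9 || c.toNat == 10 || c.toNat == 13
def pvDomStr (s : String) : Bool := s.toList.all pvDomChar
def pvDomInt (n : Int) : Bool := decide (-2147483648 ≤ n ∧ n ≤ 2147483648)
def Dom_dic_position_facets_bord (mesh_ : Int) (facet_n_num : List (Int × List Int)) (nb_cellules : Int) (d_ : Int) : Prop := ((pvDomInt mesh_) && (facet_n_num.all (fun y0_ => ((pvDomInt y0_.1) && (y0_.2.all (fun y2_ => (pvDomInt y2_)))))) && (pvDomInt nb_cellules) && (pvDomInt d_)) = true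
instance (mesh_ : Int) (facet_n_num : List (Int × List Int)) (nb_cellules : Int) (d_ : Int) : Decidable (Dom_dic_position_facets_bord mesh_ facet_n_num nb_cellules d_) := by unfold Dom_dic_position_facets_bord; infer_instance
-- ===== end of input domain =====

-- B replaces A's counter-threading loop with staged passes: collect the boundary faces, generate
-- the whole DOF range at once, chunk it into d_-sized slices, and zip faces with chunks
-- (objective: alternative decomposition, same cost).


-- ===== PORT A =====
-- one loop step of A: test len(voisins)==1, then the d_==2/3/1 branch chain updating (resultat, compteur)
def pvStepA (d_ : Int) (st : PySem.Dict Int (List Int) × Int) (p : Int × List Int) :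
    PySem.Dict Int (List Int) × Int :=
  if p.2.length = 1 then
    if d_ = 2 then (st.1.insert p.1 [st.2 + 1, st.2 + 2], st.2 + 2)
    else if d_ = 3 then (st.1.insert p.1 [st.2 + 1, st.2 + 2, st.2 + 3], st.2 + 3)
    else if d_ = 1 then (st.1.insert p.1 [st.2 + 1], st.2 + 1)
    else st
  else st

def dic_position_facets_bord (mesh_ : Int) (facet_n_num : List (Int × List Int)) (nb_cellules : Int) (d_ : Int) : List (Int × List Int) :=
  (facet_n_num.foldl (pvStepA d_) (PySem.Dict.empty, nb_cellules - 1)).1.items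

-- ===== PORT B =====
-- Source B: boundary list; dofs = list(range(nb, nb + len(boundary)*d_)); blocks = [dofs[k:k+d_]
-- for k in range(0, len(dofs), d_)]; dict(zip(boundary, blocks))
def dic_position_facets_bord_alt (mesh_ : Int) (facet_n_num : List (Int × List Int)) (nb_cellules : Int) (d_ : Int) : List (Int × List Int) :=
  if d_ = 1 ∨ d_ = 2 ∨ d_ = 3 then
    let boundary := (facet_n_num.filter (fun p => p.2.length == 1)).map (·.1)
    let dofs := PySem.List.pyRange nb_cellules (nb_cellules + (boundary.length : Int) * d_) 1
    let blocks := (PySem.List.pyRange 0 (dofs.length : Int) d_).map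
        (fun k => PySem.List.slice dofs (some k) (some (k + d_)))
    ((boundary.zip blocks).foldl (fun r p => r.insert p.1 p.2) PySem.Dict.empty).items
  else []

-- ===== PRECONDITION & SPEC =====
def Spec_dic_position_facets_bord (mesh_ : Int) (facet_n_num : List (Int × List Int)) (nb_cellules : Int) (d_ : Int) (out : List (Int × List Int)) : Prop := out = dic_position_facets_bord_alt mesh_ facet_n_num nb_cellules d_
instance (mesh_ : Int) (facet_n_num : List (Int × List Int)) (nb_cellules : Int) (d_ : Int) (out : List (Int × List Int)) : Decidable (Spec_dic_position_facets_bord mesh_ facet_n_num nb_cellules d_ out) := by unfold Spec_dic_position_facets_bord; infer_instance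

-- ===== CLAIM (what is proved, stated in full; the proofs are below) =====
def Claim_equal_dic_position_facets_bord : Prop := ∀ (mesh_ : Int) (facet_n_num : List (Int × List Int)) (nb_cellules : Int) (d_ : Int), Dom_dic_position_facets_bord mesh_ facet_n_num nb_cellules d_ → Spec_dic_position_facets_bord mesh_ facet_n_num nb_cellules d_ (dic_position_facets_bord mesh_ facet_n_num nb_cellules d_)

-- ===== LEMMAS AND PROOFS =====

-- the ordered boundary-face list of B
def pvBoundary (l : List (Int × List Int)) : List Int :=
  (l.filter (fun p => p.2.length == 1)).map (·.1)

-- B's block list for n boundary faces with first DOF c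
def pvBlocks (c d : Int) (n : Nat) : List (List Int) :=
  (PySem.List.pyRange 0 ((n : Int) * d) d).map
    (fun k => PySem.List.slice (PySem.List.pyRange c (c + (n : Int) * d) 1) (some k) (some (k + d)))

-- a slice of a contiguous range is a range
lemma pvSlice_pyRange (c L a b : Int) (h0 : 0 ≤ a) (hab : a ≤ b) (hbL : b ≤ L) :
    PySem.List.slice (PySem.List.pyRange c (c + L) 1) (some a) (some b)
      = PySem.List.pyRange (c + a) (c + b) 1 := by
  rw [PySem.List.slice_toNat _ h0 (le_trans h0 hab)]
  have hsplit1 : PySem.List.pyRange c (c + L) 1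
      = PySem.List.pyRange c (c + a) 1 ++ PySem.List.pyRange (c + a) (c + L) 1 :=
    PySem.List.pyRange_one_append c (c + a) (c + L) (by omega) (by omega)
  have hsplit2 : PySem.List.pyRange (c + a) (c + L) 1
      = PySem.List.pyRange (c + a) (c + b) 1 ++ PySem.List.pyRange (c + b) (c + L) 1 :=
    PySem.List.pyRange_one_append (c + a) (c + b) (c + L) (by omega) (by omega)
  rw [hsplit1, hsplit2]
  have hl1 : (PySem.List.pyRange c (c + a) 1).length = a.toNat := by
    rw [PySem.List.length_pyRange_one]; omega
  have hl2 : (PySem.List.pyRange (c + a) (c + b) 1).length = b.toNat - a.toNat := by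
    rw [PySem.List.length_pyRange_one]; omega
  rw [List.drop_left' hl1, List.take_left' hl2]

lemma pvBlocks_zero (c d : Int) (hd : 0 < d) : pvBlocks c d 0 = [] := by
  simp [pvBlocks, PySem.List.pyRange_of_pos _ _ hd]

lemma pvBlocks_succ (c d : Int) (hd : 0 < d) (n : Nat) :
    pvBlocks c d (n + 1) = PySem.List.pyRange c (c + d) 1 :: pvBlocks (c + d) d n := by
  have hcnt : (if (0 : Int) < ((n : Int) + 1) * d then
      ((((n : Int) + 1) * d - 0 + d - 1) / d).toNat else 0) = n + 1 := by
    have hpos : (0 : Int) < ((n : Int) + 1) * d := by positivity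
    rw [if_pos hpos]
    have : (((n : Int) + 1) * d - 0 + d - 1) / d = (n : Int) + 1 := by
      have h1 : ((n : Int) + 1) * d - 0 + d - 1 = (d - 1) + d * ((n : Int) + 1) := by ring
      rw [h1, Int.add_mul_ediv_left _ _ (by omega : d ≠ 0)]
      rw [Int.ediv_eq_zero_of_lt (by omega) (by omega)]; ring
    rw [this]; omega
  have hcnt' : (if (0 : Int) < ((n : Int)) * d then
      (((n : Int) * d - 0 + d - 1) / d).toNat else 0) = n := by
    by_cases hn : n = 0
    · subst hn; simp
    · have hpos : (0 : Int) < (n : Int) * d := by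
        have : (0:Int) < (n : Int) := by exact_mod_cast Nat.pos_of_ne_zero hn
        positivity
      rw [if_pos hpos]
      have : ((n : Int) * d - 0 + d - 1) / d = (n : Int) := by
        have h1 : (n : Int) * d - 0 + d - 1 = (d - 1) + d * (n : Int) := by ring
        rw [h1, Int.add_mul_ediv_left _ _ (by omega : d ≠ 0)]
        rw [Int.ediv_eq_zero_of_lt (by omega) (by omega)]; ring
      rw [this]; omega
  unfold pvBlocks
  rw [PySem.List.pyRange_of_pos _ _ hd, PySem.List.pyRange_of_pos _ _ hd]
  push_cast
  rw [hcnt, hcnt', List.range_succ_eq_map]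
  rw [List.map_cons, List.map_cons, List.map_map, List.map_map, List.map_map,
    List.cons_eq_cons]
  constructor
  · -- head block: slice dofs [0 : d] = pyRange c (c+d)
    have h1 : ((0 : Int) + d * ((0:Nat) : Int)) = 0 := by push_cast; ring
    rw [h1]
    have h2 : ((0 : Int) + d) = d := by ring
    rw [h2, pvSlice_pyRange c (((n:Int)+1) * d) 0 d (le_refl 0) (by omega) (by nlinarith)]
    norm_num
  · -- tail blocks
    apply List.map_congr_left
    intro k hk
    have hk' : (k : Int) < n := by exact_mod_cast List.mem_range.mp hk
    simp only [Function.comp_apply]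
    have e1 : ((0 : Int) + d * ((Nat.succ k : Nat) : Int)) = d * ((k : Int) + 1) := by
      push_cast [Nat.succ_eq_add_one]; ring
    have e3 : ((0 : Int) + d * ((k:Nat) : Int)) = d * (k : Int) := by push_cast; ring
    rw [e1, e3]
    have hb : d * ((k : Int) + 1) + d ≤ ((n : Int) + 1) * d := by nlinarith
    rw [pvSlice_pyRange c (((n:Int)+1) * d) (d * ((k:Int)+1)) (d * ((k:Int)+1) + d)
      (by positivity) (by omega) hb]
    have hb' : d * (k : Int) + d ≤ (n : Int) * d := by nlinarith
    rw [pvSlice_pyRange (c + d) ((n:Int) * d) (d * (k:Int)) (d * (k:Int) + d)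
      (by positivity) (by omega) hb']
    congr 1 <;> ring

-- concrete ranges for d = 1, 2, 3
lemma pvRange1 (c : Int) : PySem.List.pyRange c (c + 1) 1 = [c] :=
  PySem.List.pyRange_one_singleton c
lemma pvRange2 (c : Int) : PySem.List.pyRange c (c + 2) 1 = [c, c + 1] := by
  rw [PySem.List.pyRange_one_cons (by omega : c < c + 2),
      show c + 2 = (c + 1) + 1 by ring, PySem.List.pyRange_one_singleton]
lemma pvRange3 (c : Int) : PySem.List.pyRange c (c + 3) 1 = [c, c + 1, c + 2] := by
  rw [PySem.List.pyRange_one_cons (by omega : c < c + 3),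
      show c + 3 = (c + 1) + 2 by ring, pvRange2]
  simp [show c + 1 + 1 = c + 2 by ring]

-- when d_ is not 1, 2 or 3, A's loop never changes its state
lemma pvStepA_id (d : Int) (h1 : d ≠ 1) (h2 : d ≠ 2) (h3 : d ≠ 3)
    (st : PySem.Dict Int (List Int) × Int) (p : Int × List Int) :
    pvStepA d st p = st := by
  simp [pvStepA, h1, h2, h3]

lemma pvFoldA_id (d : Int) (h1 : d ≠ 1) (h2 : d ≠ 2) (h3 : d ≠ 3)
    (l : List (Int × List Int)) (st : PySem.Dict Int (List Int) × Int) :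
    l.foldl (pvStepA d) st = st := by
  induction l generalizing st with
  | nil => rfl
  | cons p l ih => rw [List.foldl_cons, pvStepA_id d h1 h2 h3, ih]

-- range(0, len(dofs), d) where dofs = list(range(nb, nb + N*d)) is range(0, N*d, d)
lemma pvKeys (nb d : Int) (hd : 0 < d) (N : Nat) :
    PySem.List.pyRange 0 ((PySem.List.pyRange nb (nb + (N : Int) * d) 1).length : Int) d
      = PySem.List.pyRange 0 ((N : Int) * d) d := by
  rw [PySem.List.length_pyRange_one]
  congr 1
  have h0 : (0 : Int) ≤ (N : Int) * d := by positivity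
  omega

-- main loop invariant: A's counter fold from compteur = c equals B's zip-with-blocks fold
lemma pvLoop (d : Int) (hd : d = 1 ∨ d = 2 ∨ d = 3) (l : List (Int × List Int))
    (c : Int) (acc : PySem.Dict Int (List Int)) :
    (l.foldl (pvStepA d) (acc, c)).1 =
      ((pvBoundary l).zip (pvBlocks (c + 1) d (pvBoundary l).length)).foldl
        (fun r p => r.insert p.1 p.2) acc := by
  have hd0 : 0 < d := by rcases hd with h | h | h <;> omega
  induction l generalizing c acc with
  | nil => simp [pvBoundary, pvBlocks_zero _ _ hd0]
  | cons p l ih =>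
    by_cases hp : p.2.length = 1
    · have hf : (p.2.length == 1) = true := by simp [hp]
      have hbd : pvBoundary (p :: l) = p.1 :: pvBoundary l := by
        simp [pvBoundary, hf]
      rw [hbd, List.length_cons, pvBlocks_succ _ _ hd0, List.zip_cons_cons, List.foldl_cons]
      have hblk : PySem.List.pyRange (c + 1) (c + 1 + d) 1 =
          if d = 2 then [c + 1, c + 2] else if d = 3 then [c + 1, c + 2, c + 3]
          else [c + 1] := by
        rcases hd with h | h | h <;> subst h
        · rw [pvRange1]; norm_num
        · rw [pvRange2, (by ring : c + 1 + 1 = c + 2)]; norm_num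
        · rw [pvRange3, (by ring : c + 1 + 1 = c + 2), (by ring : c + 1 + 2 = c + 3)]
          norm_num
      have hA : pvStepA d (acc, c) p =
          (acc.insert p.1 (if d = 2 then [c + 1, c + 2] else if d = 3 then
            [c + 1, c + 2, c + 3] else [c + 1]), c + d) := by
        rcases hd with h | h | h <;> subst h <;> simp [pvStepA, hp]
      rw [List.foldl_cons, hA, ih]
      rw [hblk]
      have : c + 1 + d = c + d + 1 := by ring
      rw [this]
    · have hf : (p.2.length == 1) = false := by simp [hp]
      have hbd : pvBoundary (p :: l) = pvBoundary l := by
        simp [pvBoundary, hf]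
      rw [hbd, List.foldl_cons]
      have : pvStepA d (acc, c) p = (acc, c) := by simp [pvStepA, hp]
      rw [this, ih]

-- ===== VERDICT (by name: the statement is the Claim_ definition above) =====
theorem dic_position_facets_bord_spec : Claim_equal_dic_position_facets_bord := by
  intro mesh_ facet_n_num nb_cellules d_ _
  unfold Spec_dic_position_facets_bord dic_position_facets_bord dic_position_facets_bord_alt
  by_cases hd : d_ = 1 ∨ d_ = 2 ∨ d_ = 3
  · rw [if_pos hd]
    dsimp only
    have hd0 : 0 < d_ := by rcases hd with h | h | h <;> omega
    have hloop := pvLoop d_ hd facet_n_num (nb_cellules - 1) PySem.Dict.empty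
    rw [show nb_cellules - 1 + 1 = nb_cellules by ring] at hloop
    unfold pvBoundary pvBlocks at hloop
    rw [pvKeys nb_cellules d_ hd0
      ((facet_n_num.filter (fun p => p.2.length == 1)).map (fun x => x.1)).length, hloop]
  · rw [if_neg hd]
    simp only [not_or] at hd
    rw [pvFoldA_id d_ hd.1 hd.2.1 hd.2.2 facet_n_num _]
    rfl
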